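-- pv_equiv track=rewrite | github.com/nikovavv/c- | rabtetr3.py | div_2
-- ===== SOURCE A (Python) =====
-- def div_2(n):
--     result = []
--     carry = 0
--     for digit in n:
--         current = carry * 10 + digit
--         result.append(current // 2)
--         carry = current % 2
--
--     while len(result) > 1 and result[0] == 0:
--         result.pop(0)
--
--     return result
-- ===== SOURCE B (Python) =====
-- def div_2(n):
--     # carry into position i is just the parity of the previous digit,
--     # since (10*c + d) % 2 == d % 2; and (10*c + d)//2 == 5*c + d//2.
--     result = [5 * (p % 2) + d // 2 for p, d in zip([0] + n, n)]
--     i = 0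
--     while i < len(result) - 1 and result[i] == 0:
--         i += 1
--     return result[i:]
-- ===== Notes on version B (the rewrite author's own statement) =====
-- stated objective: alternative
-- what changed: Replaces the carry accumulator threaded through the loop by a stateless neighbor-pair map (result[i] = 5*(n[i-1]%2) + n[i]//2 over a zip with the shifted list), and replaces the repeated pop(0) leading-zero loop by computing the first non-strippable index and slicing once.
import Mathlib
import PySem

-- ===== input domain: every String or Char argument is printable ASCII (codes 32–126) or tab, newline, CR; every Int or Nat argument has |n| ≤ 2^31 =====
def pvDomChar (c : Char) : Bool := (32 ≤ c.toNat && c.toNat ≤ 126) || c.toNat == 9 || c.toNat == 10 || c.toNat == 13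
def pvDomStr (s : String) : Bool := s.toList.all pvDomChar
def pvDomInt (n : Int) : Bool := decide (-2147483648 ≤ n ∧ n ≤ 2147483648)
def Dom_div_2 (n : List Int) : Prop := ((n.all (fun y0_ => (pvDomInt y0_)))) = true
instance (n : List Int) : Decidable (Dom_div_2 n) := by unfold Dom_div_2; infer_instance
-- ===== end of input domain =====

-- B replaces A's threaded carry by a stateless neighbor-pair map (5*(prev%2) + cur//2)
-- and the repeated pop(0) strip by one index scan + slice; alternative decomposition, same cost.


-- ===== PORT A =====
-- A's while loop: 'while len(result) > 1 and result[0] == 0: result.pop(0)'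
def div_2_strip : List Int → List Int
  | a :: b :: t => if a = 0 then div_2_strip (b :: t) else a :: b :: t
  | r => r

-- the for loop threading (result, carry)
def div_2 (n : List Int) : List Int :=
  let s := n.foldl
    (fun (s : List Int × Int) digit =>
      let current := s.2 * 10 + digit
      (s.1 ++ [PySem.Int.floordiv current 2], PySem.Int.mod current 2))
    ([], 0)
  div_2_strip s.1

-- ===== PORT B =====
-- index scan 'while i < len(result) - 1 and result[i] == 0: i += 1'
def div_2_alt_idx : List Int → Nat
  | a :: b :: t => if a = 0 then 1 + div_2_alt_idx (b :: t) else 0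
  | _ => 0

def div_2_alt (n : List Int) : List Int :=
  let result := ((0 :: n).zip n).map
    (fun pd => 5 * PySem.Int.mod pd.1 2 + PySem.Int.floordiv pd.2 2)
  -- result[i:] with 0 ≤ i ≤ len result is List.drop
  result.drop (div_2_alt_idx result)

-- ===== PRECONDITION & SPEC =====
def Spec_div_2 (n : List Int) (out : List Int) : Prop := out = div_2_alt n
instance (n : List Int) (out : List Int) : Decidable (Spec_div_2 n out) := by unfold Spec_div_2; infer_instance

-- ===== CLAIM (what is proved, stated in full; the proofs are below) =====
def Claim_equal_div_2 : Prop := ∀ (n : List Int), Dom_div_2 n → Spec_div_2 n (div_2 n)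

-- ===== LEMMAS AND PROOFS =====

-- reference body: B's map written as a carry-style recursion
def pvBody (c : Int) : List Int → List Int
  | [] => []
  | d :: t => (5 * c + PySem.Int.floordiv d 2) :: pvBody (PySem.Int.mod d 2) t

lemma pvZip_eq_body (n : List Int) (p : Int) :
    (((p :: n).zip n).map
      (fun pd => 5 * PySem.Int.mod pd.1 2 + PySem.Int.floordiv pd.2 2))
      = pvBody (PySem.Int.mod p 2) n := by
  induction n generalizing p with
  | nil => rfl
  | cons d t ih =>
    simp only [List.zip_cons_cons, List.map_cons, ih d, pvBody]

lemma pvFoldl_eq (n : List Int) : ∀ (r0 : List Int) (c : Int),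
    (n.foldl
      (fun (s : List Int × Int) digit =>
        let current := s.2 * 10 + digit
        (s.1 ++ [PySem.Int.floordiv current 2], PySem.Int.mod current 2))
      (r0, c)).1 = r0 ++ pvBody c n := by
  induction n with
  | nil => intro r0 c; simp [pvBody]
  | cons d t ih =>
    intro r0 c
    have hdiv : PySem.Int.floordiv (c * 10 + d) 2 = 5 * c + PySem.Int.floordiv d 2 := by
      rw [PySem.Int.floordiv_eq_ediv_of_pos (show (0:Int) < 2 by norm_num),
          PySem.Int.floordiv_eq_ediv_of_pos (show (0:Int) < 2 by norm_num)]
      omega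
    have hmod : PySem.Int.mod (c * 10 + d) 2 = PySem.Int.mod d 2 := by
      rw [PySem.Int.mod_eq_emod_of_pos (show (0:Int) < 2 by norm_num),
          PySem.Int.mod_eq_emod_of_pos (show (0:Int) < 2 by norm_num)]
      omega
    simp only [List.foldl_cons]
    rw [hdiv, hmod, ih]
    simp [pvBody]

lemma pvStrip_eq_drop (r : List Int) : div_2_strip r = r.drop (div_2_alt_idx r) := by
  induction r with
  | nil => rfl
  | cons a t ih =>
    cases t with
    | nil => rfl
    | cons b u =>
      by_cases h : a = 0
      · simp only [div_2_strip, div_2_alt_idx, if_pos h]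
        rw [ih]
        simp [Nat.add_comm]
      · simp [div_2_strip, div_2_alt_idx, h]

-- ===== VERDICT (by name: the statement is the Claim_ definition above) =====
theorem div_2_spec : Claim_equal_div_2 := by
  intro n _
  show div_2 n = div_2_alt n
  simp only [div_2, div_2_alt]
  rw [pvFoldl_eq n [] 0, pvStrip_eq_drop, pvZip_eq_body n 0,
      show PySem.Int.mod 0 2 = 0 from by decide]
  simp
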